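-- pv_equiv track=rewrite | github.com/eliottcassidy2000/math | 04-computation/anti_aut_exhaustive.py | find_anti_auts
-- ===== SOURCE A (Python) =====
-- from itertools import permutations
--
-- def find_anti_auts(adj, n):
--     """Find all anti-automorphisms: sigma with adj[sigma(i)][sigma(j)] = 1 - adj[i][j] for i!=j."""
--     auts = []
--     for perm in permutations(range(n)):
--         ok = True
--         for i in range(n):
--             if not ok:
--                 break
--             for j in range(n):
--                 if i == j:
--                     continue
--                 if adj[perm[i] * n + perm[j]] != (1 - adj[i * n + j]):
--                     ok = False
--                     break
--         if ok:
--             auts.append(perm)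
--     return auts
-- ===== SOURCE B (Python) =====
-- def find_anti_auts(adj, n):
--     """Find all anti-automorphisms: sigma with adj[sigma(i)][sigma(j)] = 1 - adj[i][j] for i!=j.
--
--     Incremental backtracking: build the permutation position by position, trying
--     values in increasing order (so results come out in the same lexicographic
--     order as itertools.permutations), and prune a partial permutation as soon as
--     the newly placed value conflicts with any earlier position.
--     """
--     results = []
--     perm = []
--
--     def backtrack():
--         k = len(perm)
--         if k >= n:
--             results.append(tuple(perm))
--             return
--         for v in range(n):
--             if v in perm:
--                 continue
--             if all(adj[v * n + perm[i]] == 1 - adj[k * n + i]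
--                    and adj[perm[i] * n + v] == 1 - adj[i * n + k]
--                    for i in range(k)):
--                 perm.append(v)
--                 backtrack()
--                 perm.pop()
--
--     backtrack()
--     return results
-- ===== Notes on version B (the rewrite author's own statement) =====
-- stated objective: alternative
-- what changed: Replaces the exhaustive scan of all n! complete permutations with incremental backtracking that tries values in increasing order (preserving lexicographic output order) and prunes a partial permutation as soon as the newly placed value violates the anti-automorphism condition against any earlier position.
import Mathlib
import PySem

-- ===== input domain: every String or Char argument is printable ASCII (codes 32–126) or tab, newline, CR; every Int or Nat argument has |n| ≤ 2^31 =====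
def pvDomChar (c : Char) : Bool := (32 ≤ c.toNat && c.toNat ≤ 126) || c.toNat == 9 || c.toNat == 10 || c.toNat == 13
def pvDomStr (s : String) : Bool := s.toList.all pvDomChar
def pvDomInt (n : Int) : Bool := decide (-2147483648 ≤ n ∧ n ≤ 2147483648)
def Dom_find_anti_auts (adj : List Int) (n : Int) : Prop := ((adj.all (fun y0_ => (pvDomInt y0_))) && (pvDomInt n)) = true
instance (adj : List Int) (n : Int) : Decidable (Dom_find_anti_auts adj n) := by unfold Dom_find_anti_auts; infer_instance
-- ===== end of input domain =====

-- B replaces the full scan over all n! permutations by incremental backtracking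
-- with pruning of partial permutations (values tried in increasing order, so the
-- output order is unchanged).


-- ===== PORT A =====
-- itertools.permutations(range(n)) yields the permutations of the (distinct,
-- increasing) pool in lexicographic order; ported as this generator
-- (each output starts with one pool element, followed by a permutation of the
-- rest; fuel = pool length).
def pvPermsAux : Nat → List Int → List (List Int)
  | 0, _ => [[]]
  | f+1, l => l.flatMap (fun x => (pvPermsAux f (l.erase x)).map (fun r => x :: r))

-- A's inner `for j` loop: `ok` ends up False iff some j ≠ i fails the check
-- (the break stops at the first failure, which computes exactly this conjunction)
def pvRowOkA (adj : List Int) (n : Int) (perm : List Int) (i : Int) : Bool :=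
  (PySem.List.pyRange 0 n 1).all fun j =>
    i == j ||
      ((PySem.List.pyGet? adj ((PySem.List.pyGet? perm i).getD 0 * n + (PySem.List.pyGet? perm j).getD 0)).getD 0
        == 1 - (PySem.List.pyGet? adj (i * n + j)).getD 0)

-- A's outer `for i` loop with the `ok` flag (break once ok is False):
-- ok is True at the end iff every row passes
def pvCheckA (adj : List Int) (n : Int) (perm : List Int) : Bool :=
  (PySem.List.pyRange 0 n 1).all fun i => pvRowOkA adj n perm i

def find_anti_auts (adj : List Int) (n : Int) : List (List Int) :=
  (pvPermsAux (PySem.List.pyRange 0 n 1).length (PySem.List.pyRange 0 n 1)).foldl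
    (fun auts perm => if pvCheckA adj n perm then auts ++ [perm] else auts) []

-- ===== PORT B =====
-- Source B's `all(... for i in range(k))` check of the new value v at position
-- k = len(perm) against all earlier positions i < k
def pvCheckNew (adj : List Int) (n : Int) (perm : List Int) (v : Int) : Bool :=
  (List.range perm.length).all fun i =>
    ((PySem.List.pyGet? adj (v * n + perm.getD i 0)).getD 0
        == 1 - (PySem.List.pyGet? adj ((perm.length : Int) * n + (i : Int))).getD 0)
    &&
    ((PySem.List.pyGet? adj (perm.getD i 0 * n + v)).getD 0
        == 1 - (PySem.List.pyGet? adj ((i : Int) * n + (perm.length : Int))).getD 0)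

-- Source B's `backtrack()`: fuel = n - len(perm) = number of still-open positions
-- (`k >= n` ⟺ fuel = 0); the recursion returns the block of results it appends
def pvBt (adj : List Int) (n : Int) : Nat → List Int → List (List Int)
  | 0, perm => [perm]
  | f+1, perm =>
    (PySem.List.pyRange 0 n 1).flatMap fun v =>
      if v ∈ perm then []
      else if pvCheckNew adj n perm v then pvBt adj n f (perm ++ [v]) else []

def find_anti_auts_alt (adj : List Int) (n : Int) : List (List Int) :=
  pvBt adj n (PySem.List.pyRange 0 n 1).length []

-- ===== PRECONDITION & SPEC =====
-- A raises IndexError exactly when n ≥ 2 and adj has fewer than n*n-1 entries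
-- (the permutation starting (n-1, n-2, …) immediately reads adj[n*n-2], and every
-- permutation is enumerated); Pre_ excludes exactly those inputs.
def Pre_find_anti_auts (adj : List Int) (n : Int) : Prop :=
  n ≤ 1 ∨ n * n - 1 ≤ (adj.length : Int)
instance (adj : List Int) (n : Int) : Decidable (Pre_find_anti_auts adj n) := by
  unfold Pre_find_anti_auts; infer_instance

def pvWitness_find_anti_auts : List Int × Int := ([0, 1, 1, 0], 2)

def Spec_find_anti_auts (adj : List Int) (n : Int) (out : List (List Int)) : Prop := out = find_anti_auts_alt adj n
instance (adj : List Int) (n : Int) (out : List (List Int)) : Decidable (Spec_find_anti_auts adj n out) := by unfold Spec_find_anti_auts; infer_instance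

-- ===== CLAIM (what is proved, stated in full; the proofs are below) =====
def Claim_equal_find_anti_auts : Prop := ∀ (adj : List Int) (n : Int), Dom_find_anti_auts adj n → Pre_find_anti_auts adj n → Spec_find_anti_auts adj n (find_anti_auts adj n)

-- ===== LEMMAS AND PROOFS =====

-- A's accumulation loop is a filter
theorem pv_foldl_filter (c : List Int → Bool) (L : List (List Int)) (acc : List (List Int)) :
    L.foldl (fun auts perm => if c perm then auts ++ [perm] else auts) acc = acc ++ L.filter c := by
  induction L generalizing acc with
  | nil => simp
  | cons p L ih =>
    simp only [List.foldl_cons, List.filter_cons]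
    by_cases h : c p = true <;> simp [h, ih]

-- skip-by-membership inside a flatMap is a flatMap over the filtered pool
theorem pv_flatMap_skip (L : List Int) (p : List Int) (g : Int → List (List Int)) :
    (L.flatMap fun v => if v ∈ p then [] else g v)
      = (L.filter (fun v => !decide (v ∈ p))).flatMap g := by
  induction L with
  | nil => rfl
  | cons x L ih =>
    by_cases h : x ∈ p <;> simp [List.flatMap_cons, h, ih]

-- the chained per-position check Source B performs along a completion r of prefix p
def pvChain (adj : List Int) (n : Int) : List Int → List Int → Bool
  | _, [] => true
  | p, v :: r => pvCheckNew adj n p v && pvChain adj n (p ++ [v]) r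

-- MAIN invariant of the backtracking: from prefix p with the pool of still-unused
-- values having exactly `fuel` elements, pvBt returns precisely the completions
-- generated in lexicographic order that pass the chained checks.
theorem pv_bt_eq (adj : List Int) (n : Int) :
    ∀ (fuel : Nat) (p : List Int),
      ((PySem.List.pyRange 0 n 1).filter (fun v => !decide (v ∈ p))).length = fuel →
      pvBt adj n fuel p
        = ((pvPermsAux fuel ((PySem.List.pyRange 0 n 1).filter (fun v => !decide (v ∈ p)))).filter
            (fun r => pvChain adj n p r)).map (fun r => p ++ r) := by
  intro fuel
  induction fuel with
  | zero => intro p _; simp [pvBt, pvPermsAux, pvChain]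
  | succ f ih =>
    intro p hlen
    have hnodup : ((PySem.List.pyRange 0 n 1).filter (fun v => !decide (v ∈ p))).Nodup :=
      (PySem.List.nodup_pyRange_one 0 n).filter _
    rw [pvBt, pv_flatMap_skip, pvPermsAux]
    rw [List.filter_flatMap, List.map_flatMap]
    apply List.flatMap_congr  -- pointwise on the filtered pool
    intro v hv
    have hvp : v ∉ p := by
      have := List.of_mem_filter hv; simpa using this
    have herase :
        (PySem.List.pyRange 0 n 1).filter (fun x => !decide (x ∈ p ++ [v]))
          = ((PySem.List.pyRange 0 n 1).filter (fun x => !decide (x ∈ p))).erase v := by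
      rw [hnodup.erase_eq_filter, List.filter_filter]
      apply List.filter_congr
      intro x _
      by_cases hx1 : x ∈ p <;> by_cases hx2 : x = v <;> simp [hx1, hx2]
    have hlen' :
        ((PySem.List.pyRange 0 n 1).filter (fun x => !decide (x ∈ p ++ [v]))).length = f := by
      rw [herase, List.length_erase_of_mem hv, hlen]
      omega
    by_cases hc : pvCheckNew adj n p v = true
    · rw [if_pos hc, ih _ hlen', herase]
      rw [List.filter_map, List.map_map]
      have hfun : ((fun r : List Int => p ++ r) ∘ fun r => v :: r)
          = (fun r : List Int => p ++ [v] ++ r) := by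
        funext r; simp
      rw [hfun]
      congr 1
      apply List.filter_congr
      intro r _
      simp [Function.comp, pvChain, hc]
    · rw [if_neg hc]
      rw [List.filter_map, List.map_map]
      have hnil : ((pvPermsAux f (((PySem.List.pyRange 0 n 1).filter
                (fun v => !decide (v ∈ p))).erase v)).filter
                ((fun r => pvChain adj n p r) ∘ (fun r => v :: r))) = [] := by
        apply List.filter_eq_nil_iff.mpr
        intro r _
        simp [Function.comp, pvChain, hc]
      rw [hnil, List.map_nil]

-- every output of the permutation generator (run with full fuel) is a permutation of the pool
theorem pv_perms_mem : ∀ (fuel : Nat) (l : List Int), l.length = fuel →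
    ∀ r ∈ pvPermsAux fuel l, r.Perm l := by
  intro fuel
  induction fuel with
  | zero =>
    intro l hl r hr
    simp [pvPermsAux] at hr
    subst hr
    cases l with
    | nil => exact List.Perm.refl _
    | cons a l => simp at hl
  | succ f ih =>
    intro l hl r hr
    simp only [pvPermsAux, List.mem_flatMap, List.mem_map] at hr
    obtain ⟨x, hx, r', hr', rfl⟩ := hr
    have hle : (l.erase x).length = f := by
      rw [List.length_erase_of_mem hx, hl]
      omega
    exact ((ih _ hle r' hr').cons x).trans (List.perm_cons_erase hx).symm

-- chained checks unfolded to a ∀ over positions (relative to the prefix p)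
theorem pv_chain_iff (adj : List Int) (n : Int) :
    ∀ (r p : List Int),
      pvChain adj n p r = true ↔
        ∀ k, k < r.length → pvCheckNew adj n (p ++ r.take k) (r.getD k 0) = true := by
  intro r
  induction r with
  | nil => intro p; simp [pvChain]
  | cons v r ih =>
    intro p
    simp only [pvChain, Bool.and_eq_true, ih (p ++ [v])]
    constructor
    · rintro ⟨h0, h⟩ k hk
      cases k with
      | zero => simpa using h0
      | succ k =>
        have := h k (by simpa using Nat.lt_of_succ_lt_succ hk)
        simpa [List.append_assoc] using this
    · intro h
      refine ⟨by simpa using h 0 (by simp), ?_⟩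
      intro k hk
      have := h (k+1) (by simpa using Nat.succ_lt_succ hk)
      simpa [List.append_assoc] using this

-- the single comparison both programs make, for Nat positions a b of perm
def pvCmp (adj : List Int) (n : Int) (perm : List Int) (a b : Nat) : Bool :=
  (PySem.List.pyGet? adj (perm.getD a 0 * n + perm.getD b 0)).getD 0
    == 1 - (PySem.List.pyGet? adj ((a : Int) * n + (b : Int))).getD 0

-- pvCheckNew on a prefix of perm is the pair of comparisons against each earlier position
theorem pv_checkNew_take (adj : List Int) (n : Int) (perm : List Int) (k : Nat)
    (hk : k < perm.length) :
    pvCheckNew adj n (perm.take k) (perm.getD k 0) = true ↔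
      ∀ i, i < k → (pvCmp adj n perm k i = true ∧ pvCmp adj n perm i k = true) := by
  have hlen : (perm.take k).length = k := List.length_take_of_le (Nat.le_of_lt hk)
  have htake : ∀ i : Nat, i < k → (perm.take k).getD i 0 = perm.getD i 0 := by
    intro i hi
    simp only [List.getD_eq_getElem?_getD]
    rw [List.getElem?_take_of_lt hi]
  simp only [pvCheckNew, List.all_eq_true, List.mem_range, hlen, pvCmp,
    Bool.and_eq_true]
  constructor
  · intro h i hi
    have := h i hi
    rwa [htake i hi] at this
  · intro h i hi
    have := h i hi
    rwa [htake i hi]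

-- A's check, unfolded to a ∀ over Int pairs in range(n)
theorem pv_checkA_iff (adj : List Int) (n : Int) (perm : List Int)
    (hlen : perm.length = (PySem.List.pyRange 0 n 1).length) :
    pvCheckA adj n perm = true ↔
      ∀ a b : Nat, a < perm.length → b < perm.length → a ≠ b →
        pvCmp adj n perm a b = true := by
  simp only [pvCheckA, pvRowOkA, List.all_eq_true, PySem.List.mem_pyRange_one]
  rw [hlen, PySem.List.length_pyRange_one]
  simp only [Int.sub_zero]
  constructor
  · intro h a b ha hb hab
    have h0a : (0:Int) ≤ (a:Int) := Int.natCast_nonneg a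
    have han : (a:Int) < n := by
      have := ha; omega
    have hbn : (b:Int) < n := by
      have := hb; omega
    have := h (a:Int) ⟨h0a, han⟩ (b:Int) ⟨Int.natCast_nonneg b, hbn⟩
    rcases (Bool.or_eq_true _ _).mp this with heq | hcmp
    · exfalso; exact hab (by exact_mod_cast (beq_iff_eq.mp heq))
    · -- translate the Int-indexed reads of perm into getD reads
      rw [pvCmp]
      have hga : (PySem.List.pyGet? perm (a:Int)).getD 0 = perm.getD a 0 := by
        simp [PySem.List.pyGet?_natCast, List.getD_eq_getElem?_getD]
      have hgb : (PySem.List.pyGet? perm (b:Int)).getD 0 = perm.getD b 0 := by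
        simp [PySem.List.pyGet?_natCast, List.getD_eq_getElem?_getD]
      rwa [hga, hgb] at hcmp
  · intro h i hi j hj
    by_cases hij : i = j
    · simp [hij]
    · have h0i := hi.1; have h0j := hj.1
      have hi' : i.toNat < (n.toNat) := by omega
      have hj' : j.toNat < (n.toNat) := by omega
      have hne : i.toNat ≠ j.toNat := by omega
      have := h i.toNat j.toNat (by omega) (by omega) hne
      simp only [pvCmp] at this
      have hga : (PySem.List.pyGet? perm i).getD 0 = perm.getD i.toNat 0 := by
        rw [PySem.List.pyGet?_of_nonneg perm h0i]
        simp [List.getD_eq_getElem?_getD]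
      have hgb : (PySem.List.pyGet? perm j).getD 0 = perm.getD j.toNat 0 := by
        rw [PySem.List.pyGet?_of_nonneg perm h0j]
        simp [List.getD_eq_getElem?_getD]
      have hci : ((i.toNat : Nat) : Int) = i := by omega
      have hcj : ((j.toNat : Nat) : Int) = j := by omega
      rw [hci, hcj] at this
      simp only [hga, hgb]
      simp [hij]
      simpa [List.getD_eq_getElem?_getD] using this

-- core: on any permutation of range(n), A's full check agrees with B's chained check
theorem pv_check_agree (adj : List Int) (n : Int) (perm : List Int)
    (hperm : perm.Perm (PySem.List.pyRange 0 n 1)) :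
    pvCheckA adj n perm = pvChain adj n [] perm := by
  have hlen : perm.length = (PySem.List.pyRange 0 n 1).length := hperm.length_eq
  rw [Bool.eq_iff_iff, pv_checkA_iff adj n perm hlen, pv_chain_iff]
  constructor
  · intro h k hk
    rw [List.nil_append]
    rw [pv_checkNew_take adj n perm k hk]
    intro i hi
    exact ⟨h k i hk (Nat.lt_trans hi hk) (Nat.ne_of_gt hi),
           h i k (Nat.lt_trans hi hk) hk (Nat.ne_of_lt hi)⟩
  · intro h a b ha hb hab
    rcases Nat.lt_or_ge a b with hlt | hge
    · have := h b hb
      rw [List.nil_append, pv_checkNew_take adj n perm b hb] at this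
      exact (this a hlt).2
    · have hlt : b < a := Nat.lt_of_le_of_ne hge (fun e => hab e.symm)
      have := h a ha
      rw [List.nil_append, pv_checkNew_take adj n perm a ha] at this
      exact (this b hlt).1

-- ===== VERDICT (by name: the statement is the Claim_ definition above) =====
theorem find_anti_auts_spec : Claim_equal_find_anti_auts := by
  intro adj n _ _
  unfold Spec_find_anti_auts find_anti_auts find_anti_auts_alt
  rw [pv_foldl_filter, List.nil_append]
  have hfilter : (PySem.List.pyRange 0 n 1).filter (fun v => !decide (v ∈ ([] : List Int)))
      = PySem.List.pyRange 0 n 1 := by simp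
  rw [pv_bt_eq adj n _ [] (by rw [hfilter]), hfilter]
  rw [show (fun r : List Int => [] ++ r) = id by funext r; simp, List.map_id]
  apply List.filter_congr
  intro r hr
  exact pv_check_agree adj n r
    (pv_perms_mem _ (PySem.List.pyRange 0 n 1) rfl r hr)
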